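-- pv_equiv track=rewrite | github.com/Colletotrichum1/GOAT | OrthoCountOnChrom.py | copyNumberOnChrom
-- ===== SOURCE A (Python) =====
-- def copyNumberOnChrom(geneID:list, ortho_dict:dict) -> dict:
-- 	"""
-- 	count accessory's gene orthogroups on core/accessory chromosomes
--
-- 	:param geneID: Accessory chromosomes' gene id list
-- 	:param ortho_dict: Dict from Orthogroups.txt file
-- 	:return:
-- 	"""
-- 	strain_prefix = geneID[0][0:5]
-- 	res = {}
-- 	for gene in geneID:
-- 		for og in ortho_dict:
-- 			og_geneList = ortho_dict[og]
-- 			if gene in og_geneList: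
-- 				sub_ogList = [i for i in og_geneList if i[0:5] == strain_prefix]
-- 				geneOnCoreChrom = [i for i in sub_ogList if i not in geneID]
-- 				geneOnAccessoryChrom = [i for i in sub_ogList if i in geneID]
-- 				res[gene] = (len(geneOnCoreChrom), len(geneOnAccessoryChrom)-1)
-- 				break
-- 	return res
-- ===== SOURCE B (Python) =====
-- def copyNumberOnChrom(geneID: list, ortho_dict: dict) -> dict:
--     """Reverse index gene -> first orthogroup list + set membership; one counting pass per gene."""
--     strain_prefix = geneID[0][0:5]
--     gene_set = set(geneID)
--     index = {}
--     for og_geneList in ortho_dict.values():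
--         for m in og_geneList:
--             index.setdefault(m, og_geneList)
--     res = {}
--     for gene in geneID:
--         lst = index.get(gene)
--         if lst is None:
--             continue
--         core = 0
--         acc = 0
--         for m in lst:
--             if m[0:5] == strain_prefix:
--                 if m in gene_set:
--                     acc += 1
--                 else:
--                     core += 1
--         res[gene] = (core, acc - 1)
--     return res
-- ===== Notes on version B (the rewrite author's own statement) =====
-- stated objective: faster
-- what changed: Instead of rescanning every orthogroup (and re-filtering with list membership) for each gene, B builds once a reverse index mapping each gene to the first orthogroup list containing it plus a set of geneID for O(1) membership, then does one counting pass per gene.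
-- outside the precondition, e.g. on copyNumberOnChrom([], {}): A raises IndexError, B raises IndexError
import Mathlib
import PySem

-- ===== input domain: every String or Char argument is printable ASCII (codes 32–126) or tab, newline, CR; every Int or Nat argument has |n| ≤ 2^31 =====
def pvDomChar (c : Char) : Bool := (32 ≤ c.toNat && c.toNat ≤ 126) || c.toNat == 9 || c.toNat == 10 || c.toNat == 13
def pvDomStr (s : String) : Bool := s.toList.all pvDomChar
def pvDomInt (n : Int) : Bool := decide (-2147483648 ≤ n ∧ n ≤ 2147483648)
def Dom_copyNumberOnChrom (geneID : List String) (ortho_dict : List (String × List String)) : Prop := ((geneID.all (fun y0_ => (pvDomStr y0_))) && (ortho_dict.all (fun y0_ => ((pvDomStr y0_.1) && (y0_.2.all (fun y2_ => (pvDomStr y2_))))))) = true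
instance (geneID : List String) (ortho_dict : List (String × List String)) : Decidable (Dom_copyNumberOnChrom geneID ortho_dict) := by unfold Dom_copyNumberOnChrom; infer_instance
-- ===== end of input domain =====

-- B replaces A's rescan of all orthogroups per gene by a reverse index gene→first-orthogroup-list
-- plus a set for membership tests, with one counting pass per gene (objective: faster).


-- ===== PORT A =====
-- A's inner 'for og in ortho_dict: … break' loop
def pvInnerA (geneID : List String) (strain_prefix : String) (gene : String)
    (res : PySem.Dict String (Int × Int)) :
    List (String × List String) → PySem.Dict String (Int × Int)
  | [] => res
  | (_, og_geneList) :: rest =>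
      if og_geneList.contains gene then
        let sub_ogList := og_geneList.filter (fun i => PySem.Str.slice i (some 0) (some 5) == strain_prefix)
        let geneOnCoreChrom := sub_ogList.filter (fun i => !(geneID.contains i))
        let geneOnAccessoryChrom := sub_ogList.filter (fun i => geneID.contains i)
        res.insert gene ((geneOnCoreChrom.length : Int), (geneOnAccessoryChrom.length : Int) - 1)
      else pvInnerA geneID strain_prefix gene res rest

def copyNumberOnChrom (geneID : List String) (ortho_dict : List (String × List String)) : List (String × Int × Int) :=
  match PySem.List.pyGet? geneID 0 with
  | none => []  -- IndexError on geneID[0]: excluded by Pre_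
  | some g0 =>
    let strain_prefix := PySem.Str.slice g0 (some 0) (some 5)
    let d := PySem.Dict.ofList ortho_dict
    (geneID.foldl (fun res gene => pvInnerA geneID strain_prefix gene res d.items) PySem.Dict.empty).items

-- ===== PORT B =====
def copyNumberOnChrom_alt (geneID : List String) (ortho_dict : List (String × List String)) : List (String × Int × Int) :=
  match PySem.List.pyGet? geneID 0 with
  | none => []  -- IndexError on geneID[0]: excluded by Pre_
  | some g0 =>
    let strain_prefix := PySem.Str.slice g0 (some 0) (some 5)
    let gene_set := PySem.Set.ofList geneID
    let d := PySem.Dict.ofList ortho_dict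
    let index := d.items.foldl
      (fun idx p => p.2.foldl (fun idx m => idx.setdefault m p.2) idx)
      (PySem.Dict.empty : PySem.Dict String (List String))
    (geneID.foldl (fun res gene =>
        match index.get? gene with
        | none => res
        | some lst =>
          let cnt := lst.foldl (fun (ca : Int × Int) m =>
              if PySem.Str.slice m (some 0) (some 5) == strain_prefix then
                if PySem.Set.contains gene_set m then (ca.1, ca.2 + 1) else (ca.1 + 1, ca.2)
              else ca) ((0 : Int), (0 : Int))
          res.insert gene (cnt.1, cnt.2 - 1)) PySem.Dict.empty).items

-- ===== PRECONDITION & SPEC =====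
-- Pre_ excludes only the empty gene list, on which A raises IndexError at geneID[0].
def Pre_copyNumberOnChrom (geneID : List String) (ortho_dict : List (String × List String)) : Prop :=
  geneID.isEmpty = false
instance (geneID : List String) (ortho_dict : List (String × List String)) : Decidable (Pre_copyNumberOnChrom geneID ortho_dict) := by unfold Pre_copyNumberOnChrom; infer_instance
def pvWitness_copyNumberOnChrom : List String × (List (String × List String)) :=
  (["str01g1", "str01g2"], [("OG1", ["str01g1", "str01g3"]), ("OG2", ["str01g2"])])

def Spec_copyNumberOnChrom (geneID : List String) (ortho_dict : List (String × List String)) (out : List (String × Int × Int)) : Prop := out = copyNumberOnChrom_alt geneID ortho_dict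
instance (geneID : List String) (ortho_dict : List (String × List String)) (out : List (String × Int × Int)) : Decidable (Spec_copyNumberOnChrom geneID ortho_dict out) := by unfold Spec_copyNumberOnChrom; infer_instance

-- ===== CLAIM (what is proved, stated in full; the proofs are below) =====
def Claim_equal_copyNumberOnChrom : Prop := ∀ (geneID : List String) (ortho_dict : List (String × List String)), Dom_copyNumberOnChrom geneID ortho_dict → Pre_copyNumberOnChrom geneID ortho_dict → Spec_copyNumberOnChrom geneID ortho_dict (copyNumberOnChrom geneID ortho_dict)

-- ===== LEMMAS AND PROOFS =====

-- first orthogroup gene list (in dict order) containing g — the common characterisation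
def pvFirstOG (g : String) : List (String × List String) → Option (List String)
  | [] => none
  | (_, l) :: rest => if l.contains g then some l else pvFirstOG g rest

-- B's setdefault fold over one list: first-come-keeps semantics
theorem pvSetdefault_fold_get (v : List String) (g : String) (l : List String) :
    ∀ (d : PySem.Dict String (List String)),
      (l.foldl (fun d m => d.setdefault m v) d).get? g =
        match d.get? g with
        | some w => some w
        | none => if l.contains g then some v else none := by
  induction l with
  | nil =>
    intro d; simp only [List.foldl_nil, List.contains_nil, Bool.false_eq_true, if_false]
    cases d.get? g <;> rfl
  | cons x l ih =>
    intro d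
    rw [List.foldl_cons, ih]
    by_cases hx : x = g
    · subst hx
      rw [PySem.Dict.get?_setdefault_self]
      cases d.get? x <;> simp
    · rw [PySem.Dict.get?_setdefault_of_ne (hne := fun h => hx h.symm)]
      cases d.get? g <;> simp [Ne.symm hx]

-- B's reverse-index lookup equals the first containing orthogroup list
theorem pvIndex_get (g : String) (items : List (String × List String)) :
    ∀ (idx : PySem.Dict String (List String)),
      (items.foldl (fun idx p => p.2.foldl (fun idx m => idx.setdefault m p.2) idx) idx).get? g =
        match idx.get? g with
        | some w => some w
        | none => pvFirstOG g items := by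
  induction items with
  | nil => intro idx; simp only [List.foldl_nil, pvFirstOG]; cases idx.get? g <;> rfl
  | cons p rest ih =>
    intro idx
    rw [List.foldl_cons, ih, pvSetdefault_fold_get]
    simp only [pvFirstOG]
    cases h : idx.get? g
    · cases p.2.contains g <;> simp
    · rfl

-- B's one-pass counter equals A's two filter lengths
theorem pvCount_fold (sp : String) (gs : List String) (l : List String) :
    ∀ (a b : Int),
      l.foldl (fun (ca : Int × Int) m =>
          if PySem.Str.slice m (some 0) (some 5) == sp then
            if gs.contains m then (ca.1, ca.2 + 1) else (ca.1 + 1, ca.2)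
          else ca) (a, b) =
        (a + (((l.filter (fun i => PySem.Str.slice i (some 0) (some 5) == sp)).filter
                (fun i => !(gs.contains i))).length : Int),
         b + (((l.filter (fun i => PySem.Str.slice i (some 0) (some 5) == sp)).filter
                (fun i => gs.contains i)).length : Int)) := by
  induction l with
  | nil => intro a b; simp
  | cons m l ih =>
    intro a b
    rw [List.foldl_cons]
    by_cases h1 : (PySem.Str.slice m (some 0) (some 5) == sp) = true
    · rw [if_pos h1]
      by_cases h2 : m ∈ gs
      · rw [if_pos (by simpa using h2), ih]
        simp [h1, h2, Prod.ext_iff]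
        omega
      · rw [if_neg (by simpa using h2), ih]
        simp [h1, h2, Prod.ext_iff]
        omega
    · rw [if_neg h1, ih]
      simp only [Bool.not_eq_true] at h1
      simp only [List.filter_cons, h1, Bool.false_eq_true, if_false]

-- A's inner break-loop computes A's value from the first containing orthogroup
theorem pvInnerA_eq (geneID : List String) (sp gene : String)
    (res : PySem.Dict String (Int × Int)) (items : List (String × List String)) :
    pvInnerA geneID sp gene res items =
      match pvFirstOG gene items with
      | none => res
      | some l =>
          res.insert gene
            ((((l.filter (fun i => PySem.Str.slice i (some 0) (some 5) == sp)).filter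
                (fun i => !(geneID.contains i))).length : Int),
             (((l.filter (fun i => PySem.Str.slice i (some 0) (some 5) == sp)).filter
                (fun i => geneID.contains i)).length : Int) - 1) := by
  induction items with
  | nil => rfl
  | cons p rest ih =>
    obtain ⟨k, l⟩ := p
    simp only [pvInnerA, pvFirstOG]
    split
    · rfl
    · exact ih

-- membership through the geneID set equals list membership
theorem pvSet_contains (geneID : List String) (m : String) :
    PySem.Set.contains (PySem.Set.ofList geneID) m = geneID.contains m := by
  simp only [PySem.Set.contains_eq_listContains]
  by_cases h : m ∈ geneID
  · simp [h, PySem.Set.mem_ofList]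
  · simp [h, PySem.Set.mem_ofList]

theorem pvMain (geneID : List String) (ortho_dict : List (String × List String)) :
    copyNumberOnChrom geneID ortho_dict = copyNumberOnChrom_alt geneID ortho_dict := by
  unfold copyNumberOnChrom copyNumberOnChrom_alt
  cases hg : PySem.List.pyGet? geneID 0 with
  | none => rfl
  | some g0 =>
    simp only []
    congr 1
    have hstep : ∀ (res : PySem.Dict String (Int × Int)) (gene : String),
        pvInnerA geneID (PySem.Str.slice g0 (some 0) (some 5)) gene res
            (PySem.Dict.ofList ortho_dict).items =
          (match ((PySem.Dict.ofList ortho_dict).items.foldl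
              (fun idx p => p.2.foldl (fun idx m => idx.setdefault m p.2) idx)
              (PySem.Dict.empty : PySem.Dict String (List String))).get? gene with
          | none => res
          | some lst =>
            let cnt := lst.foldl (fun (ca : Int × Int) m =>
                if PySem.Str.slice m (some 0) (some 5) == PySem.Str.slice g0 (some 0) (some 5) then
                  if PySem.Set.contains (PySem.Set.ofList geneID) m then (ca.1, ca.2 + 1) else (ca.1 + 1, ca.2)
                else ca) ((0 : Int), (0 : Int))
            res.insert gene (cnt.1, cnt.2 - 1)) := by
      intro res gene
      rw [pvInnerA_eq, pvIndex_get]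
      have hempty : (PySem.Dict.empty : PySem.Dict String (List String)).get? gene = none := rfl
      rw [hempty]
      cases h : pvFirstOG gene (PySem.Dict.ofList ortho_dict).items with
      | none => rfl
      | some lst =>
        simp only []
        have hfun : (fun (ca : Int × Int) m =>
            if PySem.Str.slice m (some 0) (some 5) == PySem.Str.slice g0 (some 0) (some 5) then
              if PySem.Set.contains (PySem.Set.ofList geneID) m then (ca.1, ca.2 + 1) else (ca.1 + 1, ca.2)
            else ca) = (fun (ca : Int × Int) m =>
            if PySem.Str.slice m (some 0) (some 5) == PySem.Str.slice g0 (some 0) (some 5) then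
              if geneID.contains m then (ca.1, ca.2 + 1) else (ca.1 + 1, ca.2)
            else ca) := by
          funext ca m; rw [pvSet_contains]
        rw [hfun, pvCount_fold]
        simp
    exact PySem.List.foldl_congr_mem _ _ _ _ (fun res gene _ => hstep res gene)

-- ===== VERDICT (by name: the statement is the Claim_ definition above) =====
theorem copyNumberOnChrom_spec : Claim_equal_copyNumberOnChrom := by
  intro geneID ortho_dict _ _
  exact pvMain geneID ortho_dict
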